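-- pv_equiv track=rewrite | github.com/bhavinisai/listening-between-the-lines | src/host_guest_label/labeled_transcript_v4.py | detect_host_segments
-- ===== SOURCE A (Python) =====
-- HOST_PHRASES = [
--     # Welcoming the guest
--     "welcome to", "welcome back", "welcome back to",
--     "thanks for joining", "glad you could join", "great to have you",
--     "thank you for being here", "thank you so much for being here",
--     "thanks for coming on", "thanks for being on the show",
--
--     # Opening the episode
--     "today we have", "today i'm joined by", "today i'm talking to",
--     "my guest today", "joining me today",
--
--     # Closing the show
--     "thanks for listening", "thank you for listening",
--     "that's all for today", "that's it for today",
--     "see you next time", "until next time", "catch you next time",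
--     "i'll see you next time",
--     "don't forget to subscribe", "make sure to subscribe",
-- ]
--
-- YOUTUBE_HOST_KEYWORDS = [
--     "subscribe to this channel", "subscribe to the channel",
--     "subscribe to my channel", "hit the subscribe button",
--     "like and subscribe", "subscribe below", "click subscribe",
--     "smash that subscribe", "don't forget to subscribe",
--     "hit the bell", "notification bell",
--     "leave a like", "hit the like button",
--     "check out the description", "link in the description",
--     "support the channel", "support the show",
--     "patreon",
-- ]
--
-- SPONSOR_KEYWORDS = [
--     "sponsor", "brought to you by", "today's sponsor",
--     "this episode is sponsored", "this podcast is brought",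
--     "promo code", "discount code", "coupon code",
--     "percent off", "% off",
--     "audible", "squarespace", "hellofresh", "betterhelp",
--     "nordvpn", "athletic greens",
--     "quick word from our sponsor", "message from our sponsor",
-- ]
--
-- def contains_keywords(text, keywords):
--     text_lower = text.lower()
--     return any(keyword.lower() in text_lower for keyword in keywords)
--
-- def detect_host_segments(segments):
--     """
--     Scan all segments for host-identifying keywords.
--     Priority: YouTube CTAs > Host Phrases > Sponsors
--     Returns (matching_indices, detection_type)
--     """
--     youtube_segs = []
--     host_phrase_segs = []
--     sponsor_segs = []
--
--     for i, seg in enumerate(segments):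
--         text = seg.get('text', '')
--
--         if contains_keywords(text, YOUTUBE_HOST_KEYWORDS):
--             youtube_segs.append(i)
--         elif contains_keywords(text, HOST_PHRASES):
--             host_phrase_segs.append(i)
--         elif contains_keywords(text, SPONSOR_KEYWORDS):
--             sponsor_segs.append(i)
--
--     if youtube_segs:
--         return youtube_segs, "youtube_cta"
--     elif host_phrase_segs:
--         return host_phrase_segs, "host_phrases"
--     elif sponsor_segs:
--         return sponsor_segs, "sponsor"
--
--     return [], "none"
-- ===== SOURCE B (Python) =====
-- HOST_PHRASES = [
--     "welcome to", "welcome back", "welcome back to",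
--     "thanks for joining", "glad you could join", "great to have you",
--     "thank you for being here", "thank you so much for being here",
--     "thanks for coming on", "thanks for being on the show",
--     "today we have", "today i'm joined by", "today i'm talking to",
--     "my guest today", "joining me today",
--     "thanks for listening", "thank you for listening",
--     "that's all for today", "that's it for today",
--     "see you next time", "until next time", "catch you next time",
--     "i'll see you next time",
--     "don't forget to subscribe", "make sure to subscribe",
-- ]
--
-- YOUTUBE_HOST_KEYWORDS = [
--     "subscribe to this channel", "subscribe to the channel",
--     "subscribe to my channel", "hit the subscribe button",
--     "like and subscribe", "subscribe below", "click subscribe",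
--     "smash that subscribe", "don't forget to subscribe",
--     "hit the bell", "notification bell",
--     "leave a like", "hit the like button",
--     "check out the description", "link in the description",
--     "support the channel", "support the show",
--     "patreon",
-- ]
--
-- SPONSOR_KEYWORDS = [
--     "sponsor", "brought to you by", "today's sponsor",
--     "this episode is sponsored", "this podcast is brought",
--     "promo code", "discount code", "coupon code",
--     "percent off", "% off",
--     "audible", "squarespace", "hellofresh", "betterhelp",
--     "nordvpn", "athletic greens",
--     "quick word from our sponsor", "message from our sponsor",
-- ]
--
-- def contains_keywords(text, keywords):
--     text_lower = text.lower()
--     return any(keyword.lower() in text_lower for keyword in keywords)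
--
-- def detect_host_segments(segments):
--     # Outer loop over categories in priority order; inner scan with early return.
--     for keywords, label in ((YOUTUBE_HOST_KEYWORDS, "youtube_cta"),
--                             (HOST_PHRASES, "host_phrases"),
--                             (SPONSOR_KEYWORDS, "sponsor")):
--         hits = [i for i, seg in enumerate(segments)
--                 if contains_keywords(seg.get('text', ''), keywords)]
--         if hits:
--             return hits, label
--     return [], "none"
-- ===== Notes on version B (the rewrite author's own statement) =====
-- stated objective: simpler
-- what changed: Replaced the single pass with three accumulators and an elif chain by an outer loop over (keywords,label) categories in priority order, each filtering segment indices and returning early on the first non-empty category.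
import Mathlib
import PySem

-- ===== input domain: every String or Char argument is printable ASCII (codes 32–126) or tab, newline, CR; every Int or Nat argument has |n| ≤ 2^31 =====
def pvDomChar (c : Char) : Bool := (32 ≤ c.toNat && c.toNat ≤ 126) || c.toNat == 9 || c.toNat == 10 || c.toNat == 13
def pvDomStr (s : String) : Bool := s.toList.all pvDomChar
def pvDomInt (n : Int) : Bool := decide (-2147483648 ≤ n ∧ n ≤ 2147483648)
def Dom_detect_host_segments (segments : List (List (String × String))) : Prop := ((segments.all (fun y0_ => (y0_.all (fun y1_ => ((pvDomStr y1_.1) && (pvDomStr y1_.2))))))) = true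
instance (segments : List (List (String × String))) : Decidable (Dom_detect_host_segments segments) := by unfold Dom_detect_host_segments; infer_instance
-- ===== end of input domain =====

-- B replaces A's single pass with three accumulators and an elif chain by an outer loop
-- over priority-ordered categories, each filtering indices with early return (objective: simpler).

-- ===== PORT A =====
def pvHOST_PHRASES : List String := [
  "welcome to", "welcome back", "welcome back to",
  "thanks for joining", "glad you could join", "great to have you",
  "thank you for being here", "thank you so much for being here",
  "thanks for coming on", "thanks for being on the show",
  "today we have", "today i'm joined by", "today i'm talking to",
  "my guest today", "joining me today",
  "thanks for listening", "thank you for listening",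
  "that's all for today", "that's it for today",
  "see you next time", "until next time", "catch you next time",
  "i'll see you next time",
  "don't forget to subscribe", "make sure to subscribe"]

def pvYOUTUBE_HOST_KEYWORDS : List String := [
  "subscribe to this channel", "subscribe to the channel",
  "subscribe to my channel", "hit the subscribe button",
  "like and subscribe", "subscribe below", "click subscribe",
  "smash that subscribe", "don't forget to subscribe",
  "hit the bell", "notification bell",
  "leave a like", "hit the like button",
  "check out the description", "link in the description",
  "support the channel", "support the show",
  "patreon"]

def pvSPONSOR_KEYWORDS : List String := [
  "sponsor", "brought to you by", "today's sponsor",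
  "this episode is sponsored", "this podcast is brought",
  "promo code", "discount code", "coupon code",
  "percent off", "% off",
  "audible", "squarespace", "hellofresh", "betterhelp",
  "nordvpn", "athletic greens",
  "quick word from our sponsor", "message from our sponsor"]

def contains_keywords (text : String) (keywords : List String) : Bool :=
  let text_lower := PySem.Str.lower text
  keywords.any (fun keyword => PySem.Str.isIn (PySem.Str.lower keyword) text_lower)

def detect_host_segments (segments : List (List (String × String))) : List Int × String :=
  let st := (PySem.List.enumerate segments 0).foldl
    (fun (acc : List Int × List Int × List Int) p =>
      let text := (PySem.Dict.mk p.2).getD "text" ""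
      if contains_keywords text pvYOUTUBE_HOST_KEYWORDS then
        (acc.1 ++ [p.1], acc.2.1, acc.2.2)
      else if contains_keywords text pvHOST_PHRASES then
        (acc.1, acc.2.1 ++ [p.1], acc.2.2)
      else if contains_keywords text pvSPONSOR_KEYWORDS then
        (acc.1, acc.2.1, acc.2.2 ++ [p.1])
      else acc)
    ([], [], [])
  if st.1 ≠ [] then (st.1, "youtube_cta")
  else if st.2.1 ≠ [] then (st.2.1, "host_phrases")
  else if st.2.2 ≠ [] then (st.2.2, "sponsor")
  else ([], "none")

-- ===== PORT B =====
def pvAltHits (segments : List (List (String × String))) (keywords : List String) : List Int :=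
  ((PySem.List.enumerate segments 0).filter
    (fun p => contains_keywords ((PySem.Dict.mk p.2).getD "text" "") keywords)).map (·.1)

def pvAltLoop (segments : List (List (String × String))) :
    List (List String × String) → List Int × String
  | [] => ([], "none")
  | (keywords, label) :: rest =>
    let hits := pvAltHits segments keywords
    if hits ≠ [] then (hits, label) else pvAltLoop segments rest

def detect_host_segments_alt (segments : List (List (String × String))) : List Int × String :=
  pvAltLoop segments
    [(pvYOUTUBE_HOST_KEYWORDS, "youtube_cta"),
     (pvHOST_PHRASES, "host_phrases"),
     (pvSPONSOR_KEYWORDS, "sponsor")]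

-- ===== PRECONDITION & SPEC =====
def Spec_detect_host_segments (segments : List (List (String × String))) (out : List Int × String) : Prop := out = detect_host_segments_alt segments
instance (segments : List (List (String × String))) (out : List Int × String) : Decidable (Spec_detect_host_segments segments out) := by unfold Spec_detect_host_segments; infer_instance

-- ===== CLAIM (what is proved, stated in full; the proofs are below) =====
def Claim_equal_detect_host_segments : Prop := ∀ (segments : List (List (String × String))), Dom_detect_host_segments segments → Spec_detect_host_segments segments (detect_host_segments segments)

-- ===== LEMMAS AND PROOFS =====

def pvM (keywords : List String) (p : Int × List (String × String)) : Bool :=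
  contains_keywords ((PySem.Dict.mk p.2).getD "text" "") keywords

lemma pvFoldChar (e : List (Int × List (String × String)))
    (acc : List Int × List Int × List Int) :
    e.foldl
      (fun (acc : List Int × List Int × List Int) p =>
        let text := (PySem.Dict.mk p.2).getD "text" ""
        if contains_keywords text pvYOUTUBE_HOST_KEYWORDS then
          (acc.1 ++ [p.1], acc.2.1, acc.2.2)
        else if contains_keywords text pvHOST_PHRASES then
          (acc.1, acc.2.1 ++ [p.1], acc.2.2)
        else if contains_keywords text pvSPONSOR_KEYWORDS then
          (acc.1, acc.2.1, acc.2.2 ++ [p.1])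
        else acc) acc
    = (acc.1 ++ (e.filter (pvM pvYOUTUBE_HOST_KEYWORDS)).map (·.1),
       acc.2.1 ++ (e.filter (fun p => !pvM pvYOUTUBE_HOST_KEYWORDS p && pvM pvHOST_PHRASES p)).map (·.1),
       acc.2.2 ++ (e.filter (fun p => !pvM pvYOUTUBE_HOST_KEYWORDS p && !pvM pvHOST_PHRASES p && pvM pvSPONSOR_KEYWORDS p)).map (·.1)) := by
  induction e generalizing acc with
  | nil => simp
  | cons p rest ih =>
    simp only [List.foldl_cons, List.filter_cons]
    by_cases h1 : pvM pvYOUTUBE_HOST_KEYWORDS p <;>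
      by_cases h2 : pvM pvHOST_PHRASES p <;>
        by_cases h3 : pvM pvSPONSOR_KEYWORDS p <;>
          simp only [pvM] at h1 h2 h3 <;>
            simp [pvM, h1, h2, h3, ih]

lemma pvAltHits_eq (segments : List (List (String × String))) (kws : List String) :
    pvAltHits segments kws = ((PySem.List.enumerate segments 0).filter (pvM kws)).map (·.1) := rfl

theorem detect_host_segments_spec_aux (segments : List (List (String × String))) :
    detect_host_segments segments = detect_host_segments_alt segments := by
  unfold detect_host_segments detect_host_segments_alt
  rw [pvFoldChar]
  simp only [pvAltLoop, pvAltHits_eq, List.nil_append]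
  set e := PySem.List.enumerate segments 0 with he
  by_cases h1 : (e.filter (pvM pvYOUTUBE_HOST_KEYWORDS)).map (·.1) = []
  · have hn1 : ∀ p ∈ e, pvM pvYOUTUBE_HOST_KEYWORDS p = false := by
      simpa [List.filter_eq_nil_iff] using h1
    have hcong2 : e.filter (fun p => !pvM pvYOUTUBE_HOST_KEYWORDS p && pvM pvHOST_PHRASES p)
        = e.filter (pvM pvHOST_PHRASES) := by
      apply List.filter_congr
      intro p hp; simp [hn1 p hp]
    rw [h1, hcong2]
    simp only [ne_eq, not_true_eq_false, if_false]
    by_cases h2 : (e.filter (pvM pvHOST_PHRASES)).map (·.1) = []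
    · have hn2 : ∀ p ∈ e, pvM pvHOST_PHRASES p = false := by
        simpa [List.filter_eq_nil_iff] using h2
      have hcong3 : e.filter (fun p => !pvM pvYOUTUBE_HOST_KEYWORDS p && !pvM pvHOST_PHRASES p && pvM pvSPONSOR_KEYWORDS p)
          = e.filter (pvM pvSPONSOR_KEYWORDS) := by
        apply List.filter_congr
        intro p hp; simp [hn1 p hp, hn2 p hp]
      rw [h2, hcong3]
    · simp [h2]
  · simp [h1]

-- ===== VERDICT (by name: the statement is the Claim_ definition above) =====
theorem detect_host_segments_spec : Claim_equal_detect_host_segments := by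
  intro segments _
  exact detect_host_segments_spec_aux segments
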